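-- pv_equiv track=rewrite | github.com/Chatyusha/qdocpyConsole | qdocpyConsole/app/console.py | options_parser
-- ===== SOURCE A (Python) =====
-- def options_parser(ops):
--     ops_dict = {}
--     flag=""
--     for i in ops:
--         if i == "-f":
--             flag = "F"
--             ops_dict["file_paths"] = []
--             continue
--         if flag == "F":
--             ops_dict["file_paths"].append(i)
--     return ops_dict
-- ===== SOURCE B (Python) =====
-- def options_parser(ops):
--     ops = list(ops)
--     if "-f" not in ops:
--         return {}
--     last = len(ops) - 1 - ops[::-1].index("-f")
--     return {"file_paths": ops[last + 1:]}
-- ===== Notes on version B (the rewrite author's own statement) =====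
-- stated objective: simpler
-- what changed: Instead of a running flag and a dict mutated element-by-element, B finds the position of the last '-f' and returns the slice after it (or {} if '-f' is absent).
import Mathlib
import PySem

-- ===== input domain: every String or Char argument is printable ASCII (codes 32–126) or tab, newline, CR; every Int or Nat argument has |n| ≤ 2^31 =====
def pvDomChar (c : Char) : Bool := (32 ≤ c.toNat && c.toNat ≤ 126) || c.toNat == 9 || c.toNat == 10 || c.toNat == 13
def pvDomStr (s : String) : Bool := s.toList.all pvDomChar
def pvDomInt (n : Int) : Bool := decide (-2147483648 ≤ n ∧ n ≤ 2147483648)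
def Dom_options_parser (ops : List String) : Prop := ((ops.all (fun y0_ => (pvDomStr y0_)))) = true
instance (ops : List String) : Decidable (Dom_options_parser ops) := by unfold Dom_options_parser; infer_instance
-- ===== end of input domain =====

-- B finds the last '-f' and slices after it, instead of A's running flag + mutated dict; objective: simpler.

-- ===== PORT A =====
-- loop body of A's for-loop: state is (ops_dict, flag)
def stepA (st : PySem.Dict String (List String) × String) (i : String) :
    PySem.Dict String (List String) × String :=
  if i == "-f" then (st.1.insert "file_paths" [], "F")
  else if st.2 == "F" then
    -- ops_dict["file_paths"].append(i); key is always present when flag == "F"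
    (st.1.modify "file_paths" [] (fun xs => xs ++ [i]), st.2)
  else st

def options_parser (ops : List String) : List (String × List String) :=
  (ops.foldl stepA (PySem.Dict.empty, "")).1.items

-- ===== PORT B =====
def options_parser_alt (ops : List String) : List (String × List String) :=
  if "-f" ∈ ops then
    -- ops[::-1] is ops.reverse (PySem.List.slice?_none_none_neg_one); membership guarantees .index succeeds
    match PySem.List.index? ops.reverse "-f" with
    | some j =>
        [("file_paths", PySem.List.slice ops (some ((ops.length : Int) - 1 - (j : Int) + 1)) none)]
    | none => []
  else []

-- ===== PRECONDITION & SPEC =====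
def Spec_options_parser (ops : List String) (out : List (String × List String)) : Prop := out = options_parser_alt ops
instance (ops : List String) (out : List (String × List String)) : Decidable (Spec_options_parser ops out) := by unfold Spec_options_parser; infer_instance

-- ===== CLAIM (what is proved, stated in full; the proofs are below) =====
def Claim_equal_options_parser : Prop := ∀ (ops : List String), Dom_options_parser ops → Spec_options_parser ops (options_parser ops)

-- ===== LEMMAS AND PROOFS =====

-- the elements strictly after the last "-f"
def suffAfter (l : List String) : List String := (l.reverse.takeWhile (fun s => s != "-f")).reverse

theorem suffAfter_append (t : List String) (a : String) :
    suffAfter (t ++ [a]) = if a = "-f" then [] else suffAfter t ++ [a] := by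
  by_cases h : a = "-f"
  · simp [suffAfter, h]
  · have hb : (a != "-f") = true := by simp [h]
    simp [suffAfter, hb, h]

theorem A_char (ops : List String) :
    ops.foldl stepA (PySem.Dict.empty, "") =
      if "-f" ∈ ops then (PySem.Dict.mk [("file_paths", suffAfter ops)], "F")
      else (PySem.Dict.empty, "") := by
  induction ops using List.reverseRecOn with
  | nil => simp
  | append_singleton t a ih =>
      rw [List.foldl_append, ih, suffAfter_append]
      by_cases ha : a = "-f"
      · subst ha
        by_cases ht : "-f" ∈ t <;>
          simp [ht, stepA, PySem.Dict.insert, PySem.Dict.empty, PySem.Dict.contains]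
      · by_cases ht : "-f" ∈ t <;>
          simp [ht, ha, stepA, PySem.Dict.modify, PySem.Dict.getD, PySem.Dict.get?, PySem.Dict.insert,
                PySem.Dict.contains, PySem.Dict.empty, Ne.symm ha]

theorem index?_takeWhile (l : List String) (h : "-f" ∈ l) :
    PySem.List.index? l "-f" = some (l.takeWhile (fun s => s != "-f")).length := by
  induction l with
  | nil => simp at h
  | cons x t ih =>
      by_cases hx : x = "-f"
      · subst hx
        rw [PySem.List.index?_cons_self]
        simp [List.takeWhile]
      · have ht : "-f" ∈ t := by
          rcases List.mem_cons.mp h with h1 | h1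
          · exact absurd h1.symm hx
          · exact h1
        rw [PySem.List.index?_cons_of_ne t hx, ih ht]
        have hb : (x != "-f") = true := by simp [hx]
        simp [List.takeWhile, hb]

theorem B_char (ops : List String) :
    options_parser_alt ops =
      if "-f" ∈ ops then [("file_paths", suffAfter ops)] else [] := by
  by_cases h : "-f" ∈ ops
  · have hr : "-f" ∈ ops.reverse := by simpa using h
    rw [options_parser_alt, if_pos h, index?_takeWhile ops.reverse hr, if_pos h]
    dsimp only
    set k := (ops.reverse.takeWhile (fun s => s != "-f")).length with hk
    have hkle : k ≤ ops.length := by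
      rw [hk, ← List.length_reverse (as := ops)]
      simpa using (List.takeWhile_sublist (p := fun s => s != "-f") (l := ops.reverse)).length_le
    have harith : (ops.length : Int) - 1 - (k : Int) + 1 = ((ops.length - k : Nat) : Int) := by
      push_cast [Nat.cast_sub hkle]; ring
    rw [harith, PySem.List.slice_from_natCast]
    congr 2
    -- drop (len - k) ops = suffAfter ops
    have hsplit : ops = (ops.reverse.dropWhile (fun s => s != "-f")).reverse ++ suffAfter ops := by
      simp only [suffAfter]
      rw [← List.reverse_append, List.takeWhile_append_dropWhile, List.reverse_reverse]
    have hlen : (ops.reverse.dropWhile (fun s => s != "-f")).reverse.length = ops.length - k := by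
      have h2 := congrArg List.length
        (List.takeWhile_append_dropWhile (p := fun s => s != "-f") (l := ops.reverse))
      simp only [List.length_append, List.length_reverse] at h2
      simp only [List.length_reverse]
      omega
    have key : ∀ (pre suf : List String), ops = pre ++ suf → pre.length = ops.length - k →
        List.drop (ops.length - k) ops = suf := by
      intro pre suf hs hl
      rw [← hl]
      conv_lhs => rw [hs]
      exact List.drop_left
    exact key _ _ hsplit hlen
  · simp [options_parser_alt, h]

-- ===== VERDICT (by name: the statement is the Claim_ definition above) =====
theorem options_parser_spec : Claim_equal_options_parser := by
  intro ops _
  show options_parser ops = options_parser_alt ops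
  rw [options_parser, A_char, B_char]
  by_cases h : "-f" ∈ ops <;> simp [h, PySem.Dict.empty]
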